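-- pv_equiv track=rewrite | github.com/Abdul-Rab1729/120day-python-ai-sprint | Day14/camelCase_to_snake_case.py | camelcase_to_snakecase
-- ===== SOURCE A (Python) =====
-- def camelcase_to_snakecase(s):
--     new_str=''
--     for i in range(len(s)):
--         if ord(s[i]) in range(65,91):
--             new_str+='_'+chr(ord(s[i])+32)
--             continue
--         new_str+=s[i]
--     return new_str
-- ===== SOURCE B (Python) =====
-- import re
--
-- def camelcase_to_snakecase(s):
--     # One regex pass: each ASCII uppercase letter is replaced by '_' + its lowercase.
--     return re.sub(r'[A-Z]', lambda m: '_' + m.group(0).lower(), s)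
-- ===== Notes on version B (the rewrite author's own statement) =====
-- stated objective: idiomatic
-- what changed: Replaces the per-index loop with quadratic string concatenation by a single re.sub pass whose callback prepends an underscore and lowercases each matched uppercase ASCII letter.
import Mathlib
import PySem

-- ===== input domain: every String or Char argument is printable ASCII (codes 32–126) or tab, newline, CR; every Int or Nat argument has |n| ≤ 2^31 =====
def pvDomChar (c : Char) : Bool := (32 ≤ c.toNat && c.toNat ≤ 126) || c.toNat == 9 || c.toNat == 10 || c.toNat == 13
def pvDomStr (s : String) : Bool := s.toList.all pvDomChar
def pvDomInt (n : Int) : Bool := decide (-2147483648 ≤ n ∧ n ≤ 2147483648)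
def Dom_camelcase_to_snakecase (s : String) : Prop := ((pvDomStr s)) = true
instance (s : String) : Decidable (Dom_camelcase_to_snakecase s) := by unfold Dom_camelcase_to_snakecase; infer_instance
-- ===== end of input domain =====

-- B replaces A's per-index loop and accumulator with a single regex-substitution pass
-- ('[A-Z]' → '_' + lowercase); same output, more idiomatic.

-- ===== PORT A =====
-- for i in range(len(s)): if ord(s[i]) in range(65,91): new_str += '_'+chr(ord(s[i])+32) else new_str += s[i]
def camelcase_to_snakecase (s : String) : String :=
  String.ofList <|
    (PySem.List.pyRange 0 (PySem.Str.len s) 1).foldl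
      (fun new_str i =>
        let c := PySem.List.pyGetD s.toList i ' '   -- s[i]; i is always in range here
        if 65 ≤ c.toNat ∧ c.toNat < 91 then
          new_str ++ ['_', Char.ofNat (c.toNat + 32)]   -- '_' + chr(ord(s[i])+32)
        else
          new_str ++ [c]) []

-- ===== PORT B =====
-- re.sub(r'[A-Z]', lambda m: '_' + m.group(0).lower(), s): every character with code in
-- 65..90 (exactly the class [A-Z]) is replaced by '_' plus its lowercase (code+32, exact
-- for ASCII uppercase); all other characters pass through. Rendered as a flatMap.
def camelcase_to_snakecase_alt (s : String) : String :=
  String.ofList <|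
    s.toList.flatMap (fun c =>
      if 65 ≤ c.toNat ∧ c.toNat ≤ 90 then ['_', Char.ofNat (c.toNat + 32)] else [c])

-- ===== PRECONDITION & SPEC =====
def Spec_camelcase_to_snakecase (s : String) (out : String) : Prop := out = camelcase_to_snakecase_alt s
instance (s : String) (out : String) : Decidable (Spec_camelcase_to_snakecase s out) := by unfold Spec_camelcase_to_snakecase; infer_instance

-- ===== CLAIM (what is proved, stated in full; the proofs are below) =====
def Claim_equal_camelcase_to_snakecase : Prop := ∀ (s : String), Dom_camelcase_to_snakecase s → Spec_camelcase_to_snakecase s (camelcase_to_snakecase s)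

-- ===== LEMMAS AND PROOFS =====

-- A's loop shape: an accumulator extended on both branches is a flatMap.
theorem pv_foldl_if_append_eq_flatMap (l : List Char) (acc : List Char)
    (p : Char → Prop) [DecidablePred p] (f g : Char → List Char) :
    l.foldl (fun a c => if p c then a ++ f c else a ++ g c) acc
      = acc ++ l.flatMap (fun c => if p c then f c else g c) := by
  induction l generalizing acc with
  | nil => simp
  | cons x xs ih =>
    simp only [List.foldl_cons, List.flatMap_cons, ih]
    split_ifs <;> simp

-- ===== VERDICT (by name: the statement is the Claim_ definition above) =====
theorem camelcase_to_snakecase_spec : Claim_equal_camelcase_to_snakecase := by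
  intro s _
  show camelcase_to_snakecase s = camelcase_to_snakecase_alt s
  unfold camelcase_to_snakecase camelcase_to_snakecase_alt
  simp only [PySem.Str.len_eq]
  rw [PySem.List.foldl_pyRange_zero_pyGetD' s.toList ' '
      (fun a c => if 65 ≤ c.toNat ∧ c.toNat < 91 then a ++ ['_', Char.ofNat (c.toNat + 32)] else a ++ [c]) []]
  rw [pv_foldl_if_append_eq_flatMap]
  simp only [List.nil_append]
  congr 1
  apply List.flatMap_congr
  intro c _
  have : (65 ≤ c.toNat ∧ c.toNat < 91) ↔ (65 ≤ c.toNat ∧ c.toNat ≤ 90) := by omega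
  simp [this]
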